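-- pv_equiv track=rewrite | github.com/Zhousongjie/ROS_tutorial | 2025_8_1_2.py | solve
-- ===== SOURCE A (Python) =====
-- from typing import List
--
-- def solve(balls: List[int]) -> int:
--     """
--     计算为了让所有非空袋子中的玻璃球数量相等，需要拿出的最少玻璃球数量。
--
--     Args:
--       balls: 一个整数列表，代表每个袋子里的玻璃球数量。
--
--     Returns:
--       需要拿出的最少玻璃球总数。
--     """
--     if not balls:
--         return 0
--
--     # 候选的目标值 T 包括所有不重复的初始球数，以及 0
--     possible_targets = set(balls)
--     possible_targets.add(0)
--
--     min_removals = float('inf')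
--
--     # 遍历每一个可能的目标值 T
--     for target in possible_targets:
--         current_removals = 0
--         # 计算以当前 target 为目标时，需要拿出的总数
--         for ball_count in balls:
--             if ball_count > target:
--                 # 如果球数多于目标值，拿出多余部分
--                 current_removals += (ball_count - target)
--             elif ball_count < target:
--                 # 如果球数少于目标值，只能将该袋清空
--                 current_removals += ball_count
--
--         # 更新全局的最小值
--         min_removals = min(min_removals, current_removals)
--
--     return min_removals
-- ===== SOURCE B (Python) =====
-- from typing import List
--
-- def solve(balls: List[int]) -> int:
--     # Sort once; cost of equalizing every non-empty bag to target t is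
--     # total - t * (# of bags with >= t balls), so one sweep over the sorted
--     # list suffices: at index i, n - i bags hold at least s[i] balls when i is
--     # the first occurrence of s[i]; at later duplicate indices the computed
--     # value never beats the true minimum (it is >= cost(s[i]) for s[i] >= 0
--     # and >= total = cost(0) otherwise). Target 0 costs total.
--     if not balls:
--         return 0
--     s = sorted(balls)
--     total = sum(s)
--     n = len(s)
--     best = total
--     for i, t in enumerate(s):
--         cost = total - t * (n - i)
--         if cost < best:
--             best = cost
--     return best
-- ===== Notes on version B (the rewrite author's own statement) =====
-- stated objective: faster
-- what changed: Replaces the candidate-times-list double loop with sort + one sweep, using the closed form cost(t) = total - t * #{bags >= t} so each candidate's cost is O(1) after sorting.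
import Mathlib
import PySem

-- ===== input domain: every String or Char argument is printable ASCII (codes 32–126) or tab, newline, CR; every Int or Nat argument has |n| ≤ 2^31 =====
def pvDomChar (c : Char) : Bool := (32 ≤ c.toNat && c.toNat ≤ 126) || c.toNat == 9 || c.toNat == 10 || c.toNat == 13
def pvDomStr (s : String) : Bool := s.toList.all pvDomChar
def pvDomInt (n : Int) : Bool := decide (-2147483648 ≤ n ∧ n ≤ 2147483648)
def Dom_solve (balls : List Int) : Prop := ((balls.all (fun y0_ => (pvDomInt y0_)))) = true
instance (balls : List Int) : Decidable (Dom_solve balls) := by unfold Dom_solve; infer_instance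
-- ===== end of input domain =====

-- B replaces A's candidate-times-list double loop by sort + one sweep using the
-- closed form cost(t) = total - t * #{bags >= t}; proved to return A's exact value.


-- ===== PORT A =====
-- Literal port of A: candidates = set(balls) ∪ {0}; for each, an inner pass over balls.
-- float('inf') is modelled by the Option accumulator (none = no candidate seen yet);
-- with balls nonempty the candidate set is nonempty, so the loop always yields some value
-- and `min m cur` is Python's min(min_removals, current_removals).  The fold over the
-- Set's element list computes a minimum, which does not depend on Python's set order.
def solve (balls : List Int) : Int :=
  if balls = [] then 0 else
    let targets := PySem.Set.add (PySem.Set.ofList balls) 0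
    let r := targets.foldl (fun (acc : Option Int) target =>
      let cur := balls.foldl (fun c b =>
        if b > target then c + (b - target)
        else if b < target then c + b else c) 0
      some (match acc with | none => cur | some m => min m cur)) none
    r.getD 0

-- ===== PORT B =====
def solve_alt (balls : List Int) : Int :=
  if balls = [] then 0 else
    let s := PySem.List.sorted balls (fun x => x) false
    let total := s.sum
    let n : Int := s.length
    (PySem.List.enumerate s 0).foldl (fun best p =>
      let cost := total - p.2 * (n - p.1)
      if cost < best then cost else best) total

-- ===== PRECONDITION & SPEC =====
def Spec_solve (balls : List Int) (out : Int) : Prop := out = solve_alt balls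
instance (balls : List Int) (out : Int) : Decidable (Spec_solve balls out) := by unfold Spec_solve; infer_instance

-- ===== CLAIM (what is proved, stated in full; the proofs are below) =====
def Claim_equal_solve : Prop := ∀ (balls : List Int), Dom_solve balls → Spec_solve balls (solve balls)

-- ===== LEMMAS AND PROOFS =====

-- The cost of levelling every bag to target t: A's per-bag sum collapses to
-- total - t * #{b ≥ t}, the quantity both programs' results are compared through.
def costF (t : Int) (l : List Int) : Int := l.sum - t * (l.countP (fun b => t ≤ b) : Int)

lemma costF_cons (t b : Int) (rest : List Int) :
    costF t (b :: rest) =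
      (if b > t then b - t else if b < t then b else 0) + costF t rest := by
  simp only [costF, List.sum_cons, List.countP_cons]
  by_cases h1 : t ≤ b <;> simp [h1] <;> split_ifs <;> ring_nf <;> omega

-- A's inner loop computes costF
lemma inner_foldl_eq (t : Int) : ∀ (l : List Int) (c : Int),
    l.foldl (fun c b => if b > t then c + (b - t) else if b < t then c + b else c) c
      = c + costF t l := by
  intro l
  induction l with
  | nil => intro c; simp [costF]
  | cons b rest ih =>
    intro c
    simp only [List.foldl_cons]
    rw [ih, costF_cons]
    split_ifs <;> ring

-- A's Option-min loop, once started, is a plain running-min loop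
lemma optMin_foldl (g : Int → Int) : ∀ (l : List Int) (m : Int),
    l.foldl (fun (acc : Option Int) x =>
        some (match acc with | none => g x | some m => min m (g x))) (some m)
      = some (l.foldl (fun a x => min a (g x)) m) := by
  intro l
  induction l with
  | nil => intro m; rfl
  | cons x rest ih => intro m; simp only [List.foldl_cons]; exact ih _

lemma foldlMin_le {α : Type} (g : α → Int) : ∀ (l : List α) (a : Int),
    l.foldl (fun acc x => min acc (g x)) a ≤ a ∧
      ∀ x ∈ l, l.foldl (fun acc x => min acc (g x)) a ≤ g x := by
  intro l
  induction l with
  | nil => intro a; simp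
  | cons y rest ih =>
    intro a
    simp only [List.foldl_cons]
    obtain ⟨h1, h2⟩ := ih (min a (g y))
    refine ⟨le_trans h1 (min_le_left _ _), ?_⟩
    intro x hx
    rcases List.mem_cons.mp hx with rfl | hx
    · exact le_trans h1 (min_le_right _ _)
    · exact h2 x hx

lemma foldlMin_mem {α : Type} (g : α → Int) : ∀ (l : List α) (a : Int),
    l.foldl (fun acc x => min acc (g x)) a = a ∨
      ∃ x ∈ l, l.foldl (fun acc x => min acc (g x)) a = g x := by
  intro l
  induction l with
  | nil => intro a; simp
  | cons y rest ih =>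
    intro a
    simp only [List.foldl_cons]
    rcases ih (min a (g y)) with h | ⟨x, hx, h⟩
    · rcases min_cases a (g y) with ⟨he, _⟩ | ⟨he, _⟩
      · exact Or.inl (h.trans he)
      · exact Or.inr ⟨y, List.mem_cons_self, h.trans he⟩
    · exact Or.inr ⟨x, List.mem_cons_of_mem _ hx, h⟩

-- A's result on a nonempty list: the minimum of costF over balls ∪ {0}
lemma solve_char (balls : List Int) (h : balls ≠ []) :
    (∃ x, (x ∈ balls ∨ x = 0) ∧ solve balls = costF x balls) ∧
      ∀ x, (x ∈ balls ∨ x = 0) → solve balls ≤ costF x balls := by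
  have hmem0 : (0:Int) ∈ PySem.Set.add (PySem.Set.ofList balls) 0 := by
    rw [PySem.Set.mem_add]; right; rfl
  obtain ⟨t0, rest, hts⟩ := List.exists_cons_of_ne_nil (List.ne_nil_of_mem hmem0)
  have hmemT : ∀ x : Int, x ∈ PySem.Set.add (PySem.Set.ofList balls) 0 ↔ (x ∈ balls ∨ x = 0) := by
    intro x; rw [PySem.Set.mem_add, PySem.Set.mem_ofList]
  have hstep : (fun (acc : Option Int) target =>
      let cur := balls.foldl (fun c b =>
        if b > target then c + (b - target)
        else if b < target then c + b else c) 0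
      some (match acc with | none => cur | some m => min m cur))
      = fun (acc : Option Int) x =>
        some (match acc with | none => costF x balls | some m => min m (costF x balls)) := by
    funext acc target
    simp only [inner_foldl_eq, zero_add]
  have hsolve : solve balls = rest.foldl (fun a x => min a (costF x balls)) (costF t0 balls) := by
    unfold solve
    rw [if_neg h]
    simp only [hstep, hts, List.foldl_cons]
    rw [optMin_foldl]
    rfl
  rw [hsolve]
  constructor
  · rcases foldlMin_mem (fun x => costF x balls) rest (costF t0 balls) with he | ⟨x, hx, he⟩
    · exact ⟨t0, (hmemT t0).mp (hts ▸ List.mem_cons_self), he⟩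
    · exact ⟨x, (hmemT x).mp (hts ▸ List.mem_cons_of_mem _ hx), he⟩
  · intro x hx
    have : x ∈ t0 :: rest := hts ▸ (hmemT x).mpr hx
    obtain ⟨h1, h2⟩ := foldlMin_le (fun x => costF x balls) rest (costF t0 balls)
    rcases List.mem_cons.mp this with rfl | hxr
    · exact h1
    · exact h2 x hxr

-- B's result on a nonempty list: the minimum of total and the sweep values
lemma solve_alt_char (balls : List Int) (h : balls ≠ []) :
    (solve_alt balls = (PySem.List.sorted balls (fun x => x) false).sum ∨
      ∃ p ∈ PySem.List.enumerate (PySem.List.sorted balls (fun x => x) false) 0,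
        solve_alt balls = (PySem.List.sorted balls (fun x => x) false).sum
          - p.2 * (((PySem.List.sorted balls (fun x => x) false).length : Int) - p.1)) ∧
    (solve_alt balls ≤ (PySem.List.sorted balls (fun x => x) false).sum ∧
      ∀ p ∈ PySem.List.enumerate (PySem.List.sorted balls (fun x => x) false) 0,
        solve_alt balls ≤ (PySem.List.sorted balls (fun x => x) false).sum
          - p.2 * (((PySem.List.sorted balls (fun x => x) false).length : Int) - p.1)) := by
  have hif : ∀ (b c : Int), (if c < b then c else b) = min b c := by
    intro b c
    rw [Int.min_def]
    split_ifs <;> omega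
  have hB : solve_alt balls
      = (PySem.List.enumerate (PySem.List.sorted balls (fun x => x) false) 0).foldl
          (fun a p => min a ((PySem.List.sorted balls (fun x => x) false).sum
            - p.2 * (((PySem.List.sorted balls (fun x => x) false).length : Int) - p.1)))
          (PySem.List.sorted balls (fun x => x) false).sum := by
    unfold solve_alt
    rw [if_neg h]
    simp only [hif]
  rw [hB]
  obtain ⟨h1, h2⟩ := foldlMin_le (fun p : Int × Int =>
      (PySem.List.sorted balls (fun x => x) false).sum
        - p.2 * (((PySem.List.sorted balls (fun x => x) false).length : Int) - p.1))
    (PySem.List.enumerate (PySem.List.sorted balls (fun x => x) false) 0)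
    (PySem.List.sorted balls (fun x => x) false).sum
  exact ⟨foldlMin_mem _ _ _, h1, h2⟩

-- on the sorted list, everything from index k on is ≥ s[k], so #{b ≥ s[k]} ≥ n - k
lemma countP_ge_of_sorted (s : List Int) (hs : s.Pairwise (· ≤ ·)) (k : Nat) (hk : k < s.length)
    (t : Int) (hkt : s[k] = t) :
    s.length - k ≤ s.countP (fun b => t ≤ b) := by
  have hmono : ∀ i j (hi : i < s.length) (hj : j < s.length), i ≤ j → s[i] ≤ s[j] := by
    intro i j hi hj hij
    rcases Nat.eq_or_lt_of_le hij with rfl | hlt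
    · exact le_refl _
    · exact List.pairwise_iff_getElem.mp hs i j hi hj hlt
  have hdrop : (s.drop k).countP (fun b => t ≤ b) = (s.drop k).length := by
    rw [List.countP_eq_length]
    intro a ha
    obtain ⟨j, hj, rfl⟩ := List.mem_iff_getElem.mp ha
    rw [List.getElem_drop]
    simp only [decide_eq_true_eq]
    exact hkt ▸ hmono k (k + j) hk (by simp at hj ⊢; omega) (Nat.le_add_right _ _)
  calc s.length - k = (s.drop k).length := by simp
    _ = (s.drop k).countP (fun b => t ≤ b) := hdrop.symm
    _ ≤ s.countP (fun b => t ≤ b) := by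
        conv_rhs => rw [← List.take_append_drop k s]
        rw [List.countP_append]; omega

-- first occurrence of t in a sorted list: index k with s[k] = t and #{b ≥ t} = n - k
lemma first_occ_of_sorted : ∀ (s : List Int), s.Pairwise (· ≤ ·) → ∀ (t : Int), t ∈ s →
    ∃ k, ∃ hk : k < s.length, s[k] = t ∧ s.countP (fun b => t ≤ b) = s.length - k := by
  intro s
  induction s with
  | nil => intro _ t ht; simp at ht
  | cons a rest ih =>
    intro hs t ht
    obtain ⟨hle, hrest⟩ := List.pairwise_cons.mp hs
    by_cases hat : a = t
    · subst hat
      refine ⟨0, by simp, rfl, ?_⟩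
      have : (a :: rest).countP (fun b => a ≤ b) = (a :: rest).length := by
        rw [List.countP_eq_length]
        intro x hx
        rcases List.mem_cons.mp hx with rfl | hx
        · simp
        · simpa using hle x hx
      omega
    · have htr : t ∈ rest := by
        rcases List.mem_cons.mp ht with rfl | hx
        · exact absurd rfl hat
        · exact hx
      obtain ⟨k, hk, hkt, hc⟩ := ih hrest t htr
      have hat' : a < t := lt_of_le_of_ne (hle t htr) hat
      refine ⟨k + 1, by simpa using Nat.succ_lt_succ hk, by simpa using hkt, ?_⟩
      rw [List.countP_cons]
      simp only [decide_eq_true_eq]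
      rw [if_neg (by omega)]
      simp only [List.length_cons]
      omega

-- ===== VERDICT (by name: the statement is the Claim_ definition above) =====
theorem solve_spec : Claim_equal_solve := by
  intro balls _
  unfold Spec_solve
  by_cases h : balls = []
  · subst h; rfl
  · have hperm : (PySem.List.sorted balls (fun x => x) false).Perm balls :=
      PySem.List.sorted_perm balls (fun x => x) false
    set s := PySem.List.sorted balls (fun x => x) false with hsdef
    have hsum : s.sum = balls.sum := hperm.sum_eq
    have hcnt : ∀ t : Int, s.countP (fun b => t ≤ b) = balls.countP (fun b => t ≤ b) :=
      fun t => hperm.countP_eq _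
    have hpair : s.Pairwise (· ≤ ·) := by
      have := PySem.List.sorted_pairwise balls (fun x => x)
      simpa using this
    have hcost0 : costF 0 balls = s.sum := by simp [costF, hsum]
    obtain ⟨⟨xa, hxa, hmA⟩, hAle⟩ := solve_char balls h
    obtain ⟨hBmem, hBtot, hBle⟩ := solve_alt_char balls h
    apply le_antisymm
    · -- solve ≤ solve_alt: every value B's sweep looks at dominates some candidate cost
      rcases hBmem with hB | ⟨p, hp, hB⟩
      · rw [hB, ← hcost0]; exact hAle 0 (Or.inr rfl)
      · obtain ⟨k, hk, hpk⟩ := (PySem.List.mem_enumerate_iff _ _ _).mp hp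
        rw [hB, hpk]
        simp only [zero_add]
        have hmem : s[k] ∈ balls := hperm.mem_iff.mp (List.getElem_mem hk)
        have hcnt_ge : (s.length : Int) - k ≤ (balls.countP (fun b => s[k] ≤ b) : Int) := by
          have := countP_ge_of_sorted s hpair k hk s[k] rfl
          rw [hcnt] at this
          omega
        by_cases hsk : (0:Int) ≤ s[k]
        · have h1 : solve balls ≤ costF s[k] balls := hAle s[k] (Or.inl hmem)
          have h2 : costF s[k] balls ≤ s.sum - s[k] * ((s.length : Int) - k) := by
            unfold costF
            rw [hsum]
            have := mul_le_mul_of_nonneg_left hcnt_ge hsk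
            linarith
          exact le_trans h1 h2
        · have h1 : solve balls ≤ s.sum := by rw [← hcost0]; exact hAle 0 (Or.inr rfl)
          have h2 : s.sum ≤ s.sum - s[k] * ((s.length : Int) - k) := by
            have hnk : (0:Int) ≤ (s.length : Int) - k := by
              have h' : k < s.length := hk
              omega
            nlinarith
          exact le_trans h1 h2
    · -- solve_alt ≤ solve: each candidate's cost appears in B's sweep (first occurrence)
      rw [hmA]
      rcases hxa with hxb | rfl
      · have hxs : xa ∈ s := hperm.mem_iff.mpr hxb
        obtain ⟨k, hk, hkt, hc⟩ := first_occ_of_sorted s hpair xa hxs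
        have hp : ((0 + (k:Int), s[k]) : Int × Int) ∈ PySem.List.enumerate s 0 := by
          rw [PySem.List.mem_enumerate_iff _ _ _]
          exact ⟨k, hk, rfl⟩
        have := hBle _ hp
        simp only [zero_add] at this
        rw [hkt] at this
        have hceq : costF xa balls = s.sum - xa * ((s.length : Int) - k) := by
          unfold costF
          rw [hsum, ← hcnt, hc]
          have heq : (((s.length - k : Nat)) : Int) = (s.length : Int) - k := by
            have h' : k < s.length := hk
            omega
          rw [heq]
        rw [hceq]
        exact this
      · rw [hcost0]; exact hBtot
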